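-- pv_equiv track=rewrite | github.com/miliar/Code_Jam_Webscraper | solutions_python/solutions_year17_round0_nr3/2191.py | bathroom
-- ===== SOURCE A (Python) =====
-- import math
--
-- def bathroom(n,k):
--     #construct stalls
--     stall = [n + 2]
--     h = math.floor(math.log2(k))
--     s = n + 2
--     for i in range(h):
--         s = math.ceil((s + 1) / 2)
--
--     j = (n + 1) % (2**h)
--     if (j == 0 or (k - 2**h) < j):
--         return (math.ceil((s + 1) / 2) - 2,\
--             (s + 1) // 2 - 2)
--     else:
--         return (math.ceil(s / 2) - 2,\
--              s // 2 - 2)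
-- ===== SOURCE B (Python) =====
-- # Closed-form re-implementation: find p = 2^floor(log2 k) by integer doubling,
-- # then get the k-th person's gap size directly from divmod instead of A's
-- # float log2 + h-step iterated ceil-halving loop.
-- def bathroom(n, k):
--     p = 1
--     while 2 * p <= k:
--         p *= 2
--     q, r = divmod(n - p + 1, p)   # at the k-th person's level: r gaps of size q+1, p-r of size q
--     g = q + 1 if (k - p) < r else q
--     return (g // 2, (g - 1) // 2)
-- ===== Notes on version B (the rewrite author's own statement) =====
-- stated objective: simpler
-- what changed: Replaces A's float log2 plus h-step iterated ceil-halving loop and twin return branches with an integer doubling loop and one divmod closed form giving the served gap size directly.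
import Mathlib
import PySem

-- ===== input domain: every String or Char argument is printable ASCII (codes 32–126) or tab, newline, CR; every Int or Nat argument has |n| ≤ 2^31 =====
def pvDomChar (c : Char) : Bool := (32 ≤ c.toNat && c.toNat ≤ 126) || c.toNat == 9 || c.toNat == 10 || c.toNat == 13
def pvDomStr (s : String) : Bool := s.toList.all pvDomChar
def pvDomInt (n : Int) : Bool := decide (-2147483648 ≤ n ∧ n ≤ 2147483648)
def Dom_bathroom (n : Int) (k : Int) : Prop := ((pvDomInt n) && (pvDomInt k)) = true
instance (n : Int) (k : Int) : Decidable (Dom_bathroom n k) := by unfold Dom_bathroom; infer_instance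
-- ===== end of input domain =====

-- B computes the k-th person's gap size by a doubling loop plus one divmod closed form,
-- replacing A's float log2 and h-step iterated ceil-halving loop (objective: simpler).

-- ===== PORT A =====

-- math.ceil(x / 2) for an int x: exact, since x/2 in binary floating point is exact
-- for |x| ≤ 2^52 and ceil of a half-integer float is the integer ceiling.
def pyCeilHalf (x : Int) : Int := -(PySem.Int.floordiv (-x) 2)

def bathroom (n : Int) (k : Int) : Int × Int :=
  -- math.floor(math.log2(k)) = Nat.log2 k.toNat, exact for 1 ≤ k ≤ 2^31
  -- (log2 in double precision cannot cross an integer boundary in that range)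
  let h : Nat := Nat.log2 k.toNat
  let s : Int := (List.range h).foldl (fun s _ => pyCeilHalf (s + 1)) (n + 2)
  let j : Int := PySem.Int.mod (n + 1) ((2 : Int) ^ h)
  if j = 0 ∨ (k - (2 : Int) ^ h) < j then
    (pyCeilHalf (s + 1) - 2, PySem.Int.floordiv (s + 1) 2 - 2)
  else
    (pyCeilHalf s - 2, PySem.Int.floordiv s 2 - 2)

-- ===== PORT B =====

-- `while 2 * p <= k: p *= 2`
def growPow (k : Int) (p : Int) (hp : 0 < p) : Int :=
  if 2 * p ≤ k then growPow k (2 * p) (by omega) else p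
termination_by (k - p).toNat
decreasing_by omega

def bathroom_alt (n : Int) (k : Int) : Int × Int :=
  let p := growPow k 1 (by norm_num)
  -- divmod(n - p + 1, p); p ≥ 1 so it never raises
  let q := PySem.Int.floordiv (n - p + 1) p
  let r := PySem.Int.mod (n - p + 1) p
  let g := if k - p < r then q + 1 else q
  (PySem.Int.floordiv g 2, PySem.Int.floordiv (g - 1) 2)

-- ===== PRECONDITION & SPEC =====
-- A raises ValueError in math.log2 exactly when k ≤ 0; it returns on every k ≥ 1.
def Pre_bathroom (_n : Int) (k : Int) : Prop := 1 ≤ k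
instance (n : Int) (k : Int) : Decidable (Pre_bathroom n k) := by unfold Pre_bathroom; infer_instance
def pvWitness_bathroom : Int × Int := (10, 4)

def Spec_bathroom (n : Int) (k : Int) (out : Int × Int) : Prop := out = bathroom_alt n k
instance (n : Int) (k : Int) (out : Int × Int) : Decidable (Spec_bathroom n k out) := by unfold Spec_bathroom; infer_instance

-- ===== CLAIM (what is proved, stated in full; the proofs are below) =====
def Claim_equal_bathroom : Prop := ∀ (n : Int) (k : Int), Dom_bathroom n k → Pre_bathroom n k → Spec_bathroom n k (bathroom n k)

-- ===== LEMMAS AND PROOFS =====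

-- growPow returns the unique p·2^t with p·2^t ≤ k < 2·p·2^t
theorem growPow_spec (k p : Int) (hp : 0 < p) (hpk : p ≤ k) :
    growPow k p hp ≤ k ∧ k < 2 * growPow k p hp ∧ ∃ t : Nat, growPow k p hp = p * 2 ^ t := by
  fun_induction growPow k p hp with
  | case1 p hp h ih =>
      obtain ⟨h1, h2, t, ht⟩ := ih h
      exact ⟨h1, h2, t + 1, by rw [ht]; ring⟩
  | case2 p hp h =>
      exact ⟨hpk, by omega, 0, by ring⟩

theorem growPow_eq_pow_log2 (k : Int) (hk : 1 ≤ k) (hp : (0 : Int) < 1) :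
    growPow k 1 hp = (2 : Int) ^ Nat.log2 k.toNat := by
  obtain ⟨h1, h2, t, ht⟩ := growPow_spec k 1 hp hk
  rw [ht] at h1 h2 ⊢
  simp only [one_mul] at h1 h2 ⊢
  congr 1
  -- 2^t ≤ k < 2^(t+1) pins t = Nat.log2 k.toNat
  set m := k.toNat with hm
  have ht1 : 2 ^ t ≤ m := by
    have h' : ((2 ^ t : Nat) : Int) ≤ (m : Int) := by push_cast; omega
    exact_mod_cast h'
  have ht2 : m < 2 ^ (t + 1) := by
    have h' : (m : Int) < ((2 ^ (t + 1) : Nat) : Int) := by push_cast [pow_succ]; omega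
    exact_mod_cast h'
  have hl1 : 2 ^ Nat.log2 m ≤ m := Nat.log2_self_le (by omega)
  have hl2 : m < 2 ^ (Nat.log2 m + 1) := Nat.lt_log2_self
  have a1 : t < Nat.log2 m + 1 :=
    (Nat.pow_lt_pow_iff_right (by norm_num)).mp (lt_of_le_of_lt ht1 hl2)
  have a2 : Nat.log2 m < t + 1 :=
    (Nat.pow_lt_pow_iff_right (by norm_num)).mp (lt_of_le_of_lt hl1 ht2)
  omega

theorem pyCeilHalf_eq (x : Int) : pyCeilHalf x = -((-x) / 2) := by
  simp [pyCeilHalf]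

-- A's iterated s = ceil((s+1)/2) loop, in closed form
theorem foldl_halve (h : Nat) (n : Int) :
    (List.range h).foldl (fun s _ => pyCeilHalf (s + 1)) (n + 2) = n / 2 ^ h + 2 := by
  induction h with
  | zero => simp
  | succ h ih =>
      rw [List.range_succ, List.foldl_append, ih]
      simp only [List.foldl_cons, List.foldl_nil, pyCeilHalf_eq]
      rw [pow_succ, ← Int.ediv_ediv_of_nonneg (x := n) (by positivity : (0:Int) ≤ 2 ^ h)]
      omega

theorem bathroom_spec' (n k : Int) (hk : 1 ≤ k) : bathroom n k = bathroom_alt n k := by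
  simp only [bathroom, bathroom_alt]
  rw [growPow_eq_pow_log2 k hk, foldl_halve]
  set h := Nat.log2 k.toNat with hh
  set P : Int := (2 : Int) ^ h with hP
  have hP0 : (0 : Int) < P := by positivity
  -- P ≤ k < 2P
  have hPk : P ≤ k := by
    have h1 : 2 ^ h ≤ k.toNat := Nat.log2_self_le (by omega)
    have : ((2 ^ h : Nat) : Int) ≤ ((k.toNat : Nat) : Int) := by exact_mod_cast h1
    push_cast at this; omega
  -- floor/mod via ediv/emod (P > 0)
  rw [PySem.Int.mod_eq_emod_of_pos hP0, PySem.Int.mod_eq_emod_of_pos hP0,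
      PySem.Int.floordiv_eq_ediv_of_pos hP0]
  simp only [pyCeilHalf_eq,
    PySem.Int.floordiv_eq_ediv_of_pos (by norm_num : (0:Int) < 2)]
  set a := (n + 1) / P with ha
  set j := (n + 1) % P with hj
  have hdecomp : n + 1 = P * a + j := (Int.mul_ediv_add_emod (n + 1) P).symm.trans (by ring)
  have hj0 : 0 ≤ j := Int.emod_nonneg _ (by omega)
  have hjP : j < P := Int.emod_lt_of_pos _ hP0
  -- q = a - 1, r = j
  have hq : (n - P + 1) / P = a - 1 := by
    have : n - P + 1 = (n + 1) + (-1) * P := by ring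
    rw [this, Int.add_mul_ediv_right _ _ (by omega)]; omega
  have hr : (n - P + 1) % P = j := by
    have : n - P + 1 = (n + 1) - P := by ring
    rw [this, Int.sub_emod_right]
  rw [hq, hr]
  by_cases hjz : j = 0
  · -- A's first branch; B's else branch (k - P ≥ 0 > j = 0 is false ⇒ g = q = a - 1)
    have hnP : n / P = a - 1 := by
      have hd : n = (P - 1) + (a - 1) * P := by
        have : (a - 1) * P = P * a - P := by ring
        omega
      rw [hd, Int.add_mul_ediv_right _ _ (by omega),
          Int.ediv_eq_zero_of_lt (by omega) (by omega)]
      ring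
    rw [hnP]
    rw [if_pos (Or.inl hjz), if_neg (by omega)]
    exact Prod.ext (by omega) (by omega)
  · -- j ≠ 0 ⇒ n / P = a
    have hnP : n / P = a := by
      have hd : n = (j - 1) + a * P := by
        have : a * P = P * a := by ring
        omega
      rw [hd, Int.add_mul_ediv_right _ _ (by omega),
          Int.ediv_eq_zero_of_lt (by omega) (by omega)]
      ring
    rw [hnP]
    by_cases hkj : k - P < j
    · rw [if_pos (Or.inr hkj), if_pos hkj]
      exact Prod.ext (by omega) (by omega)
    · rw [if_neg (by tauto), if_neg hkj]
      exact Prod.ext (by omega) (by omega)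

-- ===== VERDICT (by name: the statement is the Claim_ definition above) =====
theorem bathroom_spec : Claim_equal_bathroom := by
  intro n k _ hk
  exact bathroom_spec' n k hk
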